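-- pv_equiv track=rewrite | github.com/MTecknology/homedata | projects/.archive/refactors/ssh-keyscan/new.py | is_automount
-- ===== SOURCE A (Python) =====
-- def is_automount(lines):
--     '''Returns True if path is an automount file; None if error'''
--     if not lines:
--         return None
--     # Process lines bottom-up
--     for i in range(len(lines)):
--         line = lines[(i + 1) * -1]
--         # Stop if line is not blank
--         if len(line.strip()) > 0:
--             break
--         # Return error state if all lines are blank
--         if i == len(lines):
--             return None
--     if any(c.isspace() for c in line):
--         return True
--     return False
-- ===== SOURCE B (Python) =====
-- def is_automount(lines):
--     '''Returns True if path is an automount file; None if error'''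
--     nonblank = [l for l in lines if l.strip()]
--     if not nonblank:
--         return None
--     return any(c.isspace() for c in nonblank[-1])
-- ===== Notes on version B (the rewrite author's own statement) =====
-- stated objective: simpler
-- what changed: Replaces the reverse index-walk with early break by one forward filter of the non-blank lines, picking the last one; the all-blank case becomes an error (None) as the docstring and A's dead branch intend.
-- intended difference: On non-empty input whose lines are all blank (strip()==''), A's dead 'i == len(lines)' guard never fires and it returns True/False depending on whether the first line happens to contain whitespace; B returns None, the error value A's own comment ('Return error state if all lines are blank') intends. — e.g. on is_automount([" "]): A returns some true, B returns none
import Mathlib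
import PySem

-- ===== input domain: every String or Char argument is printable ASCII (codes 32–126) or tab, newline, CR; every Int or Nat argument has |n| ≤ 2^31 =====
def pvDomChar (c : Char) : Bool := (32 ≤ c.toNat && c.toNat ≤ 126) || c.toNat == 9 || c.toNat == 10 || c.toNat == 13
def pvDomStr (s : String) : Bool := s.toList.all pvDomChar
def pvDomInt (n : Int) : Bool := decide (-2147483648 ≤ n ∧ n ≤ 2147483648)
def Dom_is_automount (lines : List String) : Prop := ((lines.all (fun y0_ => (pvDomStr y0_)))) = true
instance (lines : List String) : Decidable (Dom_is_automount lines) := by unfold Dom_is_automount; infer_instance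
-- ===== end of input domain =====

-- B replaces A's bottom-up index walk (with early break) by one forward filter of the
-- non-blank lines, picking the last one: simpler; on all-blank input B returns the
-- intended error value None where A's dead guard leaks an accidental Bool (see D_).

-- ===== PORT A =====
-- the for-loop of A over range(len(lines)); returns `none` for the in-loop `return None`
-- (unreachable, kept for faithfulness), `some line` for break / loop exhaustion
def pvLoopA (lines : List String) : List Int → String → Option String
  | [], line => some line
  | i :: rest, _ =>
      match PySem.List.pyGet? lines ((i + 1) * (-1)) with
      | none => none   -- IndexError: unreachable for i in range(len(lines))
      | some line =>
        if 0 < PySem.Str.len (PySem.Str.strip line) then some line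
        else if i == PySem.List.len lines then none
        else pvLoopA lines rest line

def is_automount (lines : List String) : Option Bool :=
  if lines = [] then none
  else
    match pvLoopA lines (PySem.List.pyRange 0 (PySem.List.len lines) 1) "" with
    | none => none
    | some line => if line.toList.any PySem.Chars.isspace then some true else some false

-- ===== PORT B =====
def is_automount_alt (lines : List String) : Option Bool :=
  let nonblank := lines.filter (fun l => PySem.Str.strip l != "")
  match nonblank.getLast? with
  | none => none
  | some line => some (line.toList.any PySem.Chars.isspace)

-- ===== PRECONDITION & SPEC =====
-- On non-empty all-blank input A's dead 'i == len(lines)' guard never fires and it returns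
-- True/False from the first (blank) line; B returns None, the error value A's comment intends.
def D_is_automount (lines : List String) : Prop :=
  lines ≠ [] ∧ (lines.all (fun l => PySem.Str.strip l == "")) = true
instance (lines : List String) : Decidable (D_is_automount lines) := by unfold D_is_automount; infer_instance

def Spec_is_automount (lines : List String) (out : Option Bool) : Prop :=
  ¬ D_is_automount lines → out = is_automount_alt lines
instance (lines : List String) (out : Option Bool) : Decidable (Spec_is_automount lines out) := by unfold Spec_is_automount; infer_instance

def pvDiffWitness_is_automount : List String := [" "]
def pvDiffWitnessOut_is_automount : (Option Bool) × (Option Bool) := (some true, none)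

-- ===== CLAIM (what is proved, stated in full; the proofs are below) =====
def Claim_unchanged_is_automount : Prop := ∀ (lines : List String), Dom_is_automount lines → Spec_is_automount lines (is_automount lines)
def Claim_changed_is_automount : Prop := Dom_is_automount (pvDiffWitness_is_automount) ∧ D_is_automount (pvDiffWitness_is_automount) ∧ is_automount (pvDiffWitness_is_automount) = pvDiffWitnessOut_is_automount.1 ∧ is_automount_alt (pvDiffWitness_is_automount) = pvDiffWitnessOut_is_automount.2 ∧ pvDiffWitnessOut_is_automount.1 ≠ pvDiffWitnessOut_is_automount.2
def Claim_exact_is_automount : Prop := ∀ (lines : List String), Dom_is_automount lines → D_is_automount lines → is_automount lines ≠ is_automount_alt lines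

-- ===== LEMMAS AND PROOFS =====

-- predicate "line is non-blank" as B writes it
def pvNB (l : String) : Bool := PySem.Str.strip l != ""

-- abstract form of A's loop as a forward scan over the reversed list
def pvScan : List String → String → String
  | [], prev => prev
  | l :: rest, _ => if pvNB l then l else pvScan rest l

lemma pvNB_iff (l : String) :
    (0 < PySem.Str.len (PySem.Str.strip l)) ↔ pvNB l = true := by
  simp [pvNB, PySem.Str.len]
  rw [← String.toList_inj, PySem.Str.toList_strip]
  simp [List.length_pos_iff]

lemma pvLoopA_eq_scan (lines : List String) :
    ∀ (k j : Nat) (prev : String), j + k = lines.length →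
    pvLoopA lines (PySem.List.pyRange (j : Int) ((lines.length : Int)) 1) prev
      = some (pvScan (lines.reverse.drop j) prev) := by
  intro k
  induction k with
  | zero =>
    intro j prev hj
    rw [PySem.List.pyRange_one_eq_nil (by omega)]
    rw [List.drop_eq_nil_of_le (by simp; omega)]
    rfl
  | succ k ih =>
    intro j prev hj
    have hjn : j < lines.length := by omega
    rw [PySem.List.pyRange_one_cons (by exact_mod_cast hjn)]
    have harg : ((j : Int) + 1) * (-1) = -(((j + 1 : Nat) : Int)) := by push_cast; ring
    have hget : PySem.List.pyGet? lines (((j : Int) + 1) * (-1))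
        = some (lines.reverse[j]'(by simpa using hjn)) := by
      rw [harg, PySem.List.pyGet?_neg_natCast lines (j + 1) (by omega) (by omega)]
      rw [List.getElem?_eq_getElem (by omega)]
      congr 1
      rw [List.getElem_reverse]
      congr 1
      omega
    have hdrop : lines.reverse.drop j
        = lines.reverse[j]'(by simpa using hjn) :: lines.reverse.drop (j + 1) :=
      List.drop_eq_getElem_cons (by simpa using hjn)
    set x := lines.reverse[j]'(by simpa using hjn) with hx
    simp only [pvLoopA, hget, hdrop]
    by_cases hb : pvNB x
    · rw [if_pos ((pvNB_iff x).mpr hb)]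
      simp [pvScan, hb]
    · rw [if_neg (fun hc => hb ((pvNB_iff x).mp hc))]
      rw [if_neg (by simp [PySem.List.len]; omega)]
      have hcast : ((j : Int) + 1) = ((j + 1 : Nat) : Int) := by push_cast; ring
      rw [hcast, ih (j + 1) x (by omega)]
      simp [pvScan, hb]

lemma pvScan_eq : ∀ (rs : List String) (prev : String),
    pvScan rs prev = (rs.find? pvNB).getD (rs.getLastD prev)
  | [], prev => by simp [pvScan]
  | l :: rest, prev => by
    by_cases h : pvNB l
    · rw [show pvScan (l :: rest) prev = l from by simp [pvScan, h],
          List.find?_cons_of_pos h]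
      rfl
    · have hf : List.find? pvNB (l :: rest) = List.find? pvNB rest :=
        List.find?_cons_of_neg (by simpa using h)
      rw [show pvScan (l :: rest) prev = pvScan rest l from by simp [pvScan, h],
          pvScan_eq rest l, hf, List.getLastD_cons]

lemma find?_eq_head?_filter (p : String → Bool) (l : List String) :
    l.find? p = (l.filter p).head? := by
  induction l with
  | nil => rfl
  | cons a t ih =>
    by_cases h : p a
    · rw [List.find?_cons_of_pos h, List.filter_cons_of_pos h, List.head?_cons]
    · rw [List.find?_cons_of_neg (by simpa using h),
          List.filter_cons_of_neg (by simpa using h), ih]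

lemma alt_eq (lines : List String) :
    is_automount_alt lines
      = match (lines.filter pvNB).getLast? with
        | none => none
        | some line => some (line.toList.any PySem.Chars.isspace) := rfl

lemma find?_reverse_eq (lines : List String) :
    lines.reverse.find? pvNB = (lines.filter pvNB).getLast? := by
  rw [find?_eq_head?_filter, List.filter_reverse, List.head?_reverse]

-- A on a non-empty list always returns the whitespace test of pvScan's line
lemma is_automount_cons (l0 : String) (t : List String) :
    is_automount (l0 :: t)
      = some ((pvScan (l0 :: t).reverse "").toList.any PySem.Chars.isspace) := by
  unfold is_automount
  rw [if_neg (by simp)]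
  have hlen : PySem.List.len (l0 :: t) = (((l0 :: t).length : Nat) : Int) := by
    simp [PySem.List.len]
  rw [show (0 : Int) = ((0 : Nat) : Int) from rfl, hlen,
      pvLoopA_eq_scan (l0 :: t) (l0 :: t).length 0 "" (by omega)]
  rw [List.drop_zero]
  cases hb : (pvScan (l0 :: t).reverse "").toList.any PySem.Chars.isspace with
  | true =>
    show (if (pvScan (l0 :: t).reverse "").toList.any PySem.Chars.isspace = true
          then some true else some false) = some true
    rw [hb]
    rfl
  | false =>
    show (if (pvScan (l0 :: t).reverse "").toList.any PySem.Chars.isspace = true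
          then some true else some false) = some false
    rw [hb]
    rfl

-- ===== VERDICT (by name: the statements are the Claim_ definitions above) =====
theorem is_automount_spec : Claim_unchanged_is_automount := by
  intro lines _ hnd
  cases lines with
  | nil => rfl
  | cons l0 t =>
    -- outside D_ a non-empty list has a non-blank line, so the filter is non-empty
    have hex : ∃ l ∈ l0 :: t, pvNB l = true := by
      by_contra hall
      push Not at hall
      exact hnd ⟨by simp, by
        simp only [List.all_eq_true]
        intro l hl
        have := hall l hl
        simpa [pvNB] using this⟩
    have hfil : (l0 :: t).filter pvNB ≠ [] := by
      obtain ⟨l, hl, hp⟩ := hex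
      intro hc
      have : l ∈ (l0 :: t).filter pvNB := List.mem_filter.mpr ⟨hl, hp⟩
      simp [hc] at this
    obtain ⟨x, hx⟩ := Option.ne_none_iff_exists'.mp
      (fun h => hfil (List.getLast?_eq_none_iff.mp h))
    rw [is_automount_cons, pvScan_eq, find?_reverse_eq, alt_eq, hx]
    simp

theorem is_automount_changed : Claim_changed_is_automount := by
  unfold Claim_changed_is_automount; decide

theorem is_automount_tight : Claim_exact_is_automount := by
  intro lines _ hd
  obtain ⟨hne, hall⟩ := hd
  cases lines with
  | nil => exact absurd rfl hne
  | cons l0 t =>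
    have hfil : (l0 :: t).filter pvNB = [] := by
      rw [List.filter_eq_nil_iff]
      intro l hl
      simp only [List.all_eq_true] at hall
      simpa [pvNB] using hall l hl
    rw [is_automount_cons, alt_eq, hfil]
    simp
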